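-- pv_equiv track=rewrite | github.com/Harry-YC/Stock-Advisor | core/validators.py | clean_doi
-- ===== SOURCE A (Python) =====
-- def clean_doi(doi: str) -> str:
--     """
--     Remove URL prefixes from DOI
--
--     Args:
--         doi: DOI string (possibly with URL prefix)
--
--     Returns:
--         Clean DOI starting with "10."
--
--     Examples:
--         >>> clean_doi("https://doi.org/10.1038/nature12373")
--         "10.1038/nature12373"
--         >>> clean_doi("10.1038/nature12373")
--         "10.1038/nature12373"
--     """
--     doi = doi.strip()
--
--     # Remove common DOI URL prefixes
--     prefixes = [
--         'https://doi.org/',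
--         'http://doi.org/',
--         'https://dx.doi.org/',
--         'http://dx.doi.org/',
--     ]
--
--     for prefix in prefixes:
--         if doi.startswith(prefix):
--             doi = doi[len(prefix):]
--             break
--
--     return doi
-- ===== SOURCE B (Python) =====
-- def clean_doi(doi: str) -> str:
--     """Staged URL parsing instead of a prefix-list loop: peel the scheme,
--     an optional 'dx.' and 'doi.org/' one component at a time; if the full
--     chain does not match, return the stripped input unchanged."""
--     doi = doi.strip()
--     rest = None
--     if doi.startswith("https://"):
--         rest = doi[8:]
--     elif doi.startswith("http://"):
--         rest = doi[7:]
--     if rest is not None: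
--         if rest.startswith("dx."):
--             rest = rest[3:]
--         if rest.startswith("doi.org/"):
--             return rest[8:]
--     return doi
-- ===== Notes on version B (the rewrite author's own statement) =====
-- stated objective: idiomatic
-- what changed: Replaces the hard-coded four-prefix list and loop/break with staged URL-component parsing (scheme, optional 'dx.', 'doi.org/'), falling back to the stripped input when the chain does not fully match.
import Mathlib
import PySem

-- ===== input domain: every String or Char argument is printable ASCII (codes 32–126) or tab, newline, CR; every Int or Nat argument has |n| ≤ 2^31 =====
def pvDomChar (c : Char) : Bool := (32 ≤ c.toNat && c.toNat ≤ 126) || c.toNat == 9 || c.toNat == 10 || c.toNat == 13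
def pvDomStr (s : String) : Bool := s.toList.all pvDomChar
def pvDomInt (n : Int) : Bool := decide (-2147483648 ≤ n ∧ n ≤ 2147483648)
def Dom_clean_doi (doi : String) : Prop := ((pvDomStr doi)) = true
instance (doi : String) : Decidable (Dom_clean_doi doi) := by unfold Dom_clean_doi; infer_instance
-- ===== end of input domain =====

-- B strips the DOI URL prefix by staged URL-component parsing (scheme, then optional "dx.",
-- then "doi.org/") instead of A's hard-coded four-prefix list with a loop/break; same value.

-- ===== PORT A =====
def pvPrefixes : List String :=
  ["https://doi.org/", "http://doi.org/", "https://dx.doi.org/", "http://dx.doi.org/"]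

def pvLoopA (s : String) : List String → String
  | [] => s
  | p :: ps =>
    if PySem.Str.startswith s p then PySem.Str.slice s (some (PySem.Str.len p)) none
    else pvLoopA s ps

def clean_doi (doi : String) : String :=
  pvLoopA (PySem.Str.strip doi) pvPrefixes

-- ===== PORT B =====
def clean_doi_alt (doi : String) : String :=
  let s := PySem.Str.strip doi
  let rest? : Option String :=
    if PySem.Str.startswith s "https://" then some (PySem.Str.slice s (some 8) none)
    else if PySem.Str.startswith s "http://" then some (PySem.Str.slice s (some 7) none)
    else none
  match rest? with
  | none => s
  | some rest =>
    let rest2 := if PySem.Str.startswith rest "dx." then PySem.Str.slice rest (some 3) none else rest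
    if PySem.Str.startswith rest2 "doi.org/" then PySem.Str.slice rest2 (some 8) none else s

-- ===== PRECONDITION & SPEC =====
def Spec_clean_doi (doi : String) (out : String) : Prop := out = clean_doi_alt doi
instance (doi : String) (out : String) : Decidable (Spec_clean_doi doi out) := by unfold Spec_clean_doi; infer_instance

-- ===== CLAIM (what is proved, stated in full; the proofs are below) =====
def Claim_equal_clean_doi : Prop := ∀ (doi : String), Dom_clean_doi doi → Spec_clean_doi doi (clean_doi doi)

-- ===== LEMMAS AND PROOFS =====

lemma pv_prefix_append_iff (a b l : List Char) :
    (a ++ b) <+: l ↔ a <+: l ∧ b <+: l.drop a.length := by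
  constructor
  · rintro ⟨t, ht⟩
    subst ht
    exact ⟨⟨b ++ t, by simp⟩, ⟨t, by simp⟩⟩
  · rintro ⟨⟨t1, h1⟩, ⟨t2, h2⟩⟩
    subst h1
    rw [List.drop_left] at h2
    exact ⟨t2, by simp [← h2]⟩

-- startswith as a decidable prefix proposition
lemma pv_swc (cs p : List Char) :
    PySem.Chars.startswith cs p = decide (p <+: cs) := by
  rw [Bool.eq_iff_iff]
  simp [PySem.Chars.startswith_iff]

lemma pv_sw (s p : String) :
    PySem.Str.startswith s p = decide (p.toList <+: s.toList) := by
  rw [PySem.Str.startswith_eq, Bool.eq_iff_iff]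
  simp [PySem.Chars.startswith_iff]

-- the four prefix tests of A, decomposed the way B tests them
lemma pv_c1 (cs : List Char) :
    ['h','t','t','p','s',':','/','/','d','o','i','.','o','r','g','/'] <+: cs ↔
      (['h','t','t','p','s',':','/','/'] <+: cs ∧ ['d','o','i','.','o','r','g','/'] <+: cs.drop 8) := by
  rw [show (['h','t','t','p','s',':','/','/','d','o','i','.','o','r','g','/'] : List Char)
        = ['h','t','t','p','s',':','/','/'] ++ ['d','o','i','.','o','r','g','/'] from rfl,
      pv_prefix_append_iff]
  simp

lemma pv_c2 (cs : List Char) :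
    ['h','t','t','p',':','/','/','d','o','i','.','o','r','g','/'] <+: cs ↔
      (['h','t','t','p',':','/','/'] <+: cs ∧ ['d','o','i','.','o','r','g','/'] <+: cs.drop 7) := by
  rw [show (['h','t','t','p',':','/','/','d','o','i','.','o','r','g','/'] : List Char)
        = ['h','t','t','p',':','/','/'] ++ ['d','o','i','.','o','r','g','/'] from rfl,
      pv_prefix_append_iff]
  simp

lemma pv_c3 (cs : List Char) :
    ['h','t','t','p','s',':','/','/','d','x','.','d','o','i','.','o','r','g','/'] <+: cs ↔
      (['h','t','t','p','s',':','/','/'] <+: cs ∧ ['d','x','.'] <+: cs.drop 8 ∧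
        ['d','o','i','.','o','r','g','/'] <+: cs.drop 11) := by
  rw [show (['h','t','t','p','s',':','/','/','d','x','.','d','o','i','.','o','r','g','/'] : List Char)
        = ['h','t','t','p','s',':','/','/'] ++ (['d','x','.'] ++ ['d','o','i','.','o','r','g','/']) from rfl,
      pv_prefix_append_iff, pv_prefix_append_iff]
  simp [List.drop_drop]

lemma pv_c4 (cs : List Char) :
    ['h','t','t','p',':','/','/','d','x','.','d','o','i','.','o','r','g','/'] <+: cs ↔
      (['h','t','t','p',':','/','/'] <+: cs ∧ ['d','x','.'] <+: cs.drop 7 ∧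
        ['d','o','i','.','o','r','g','/'] <+: cs.drop 10) := by
  rw [show (['h','t','t','p',':','/','/','d','x','.','d','o','i','.','o','r','g','/'] : List Char)
        = ['h','t','t','p',':','/','/'] ++ (['d','x','.'] ++ ['d','o','i','.','o','r','g','/']) from rfl,
      pv_prefix_append_iff, pv_prefix_append_iff]
  simp [List.drop_drop]

-- the two schemes cannot both be prefixes
lemma pv_not_both_schemes {cs : List Char}
    (h8 : ['h','t','t','p','s',':','/','/'] <+: cs) : ¬ ['h','t','t','p',':','/','/'] <+: cs := by
  intro h7
  have : (['h','t','t','p',':','/','/'] : List Char) <+: ['h','t','t','p','s',':','/','/'] :=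
    List.prefix_of_prefix_length_le h7 h8 (by decide)
  exact absurd this (by decide)

-- "dx." and "doi.org/" cannot both be prefixes of the same remainder
lemma pv_not_dx_and_doi {t : List Char}
    (hdx : ['d','x','.'] <+: t) : ¬ ['d','o','i','.','o','r','g','/'] <+: t := by
  intro hdoi
  have : (['d','x','.'] : List Char) <+: ['d','o','i','.','o','r','g','/'] :=
    List.prefix_of_prefix_length_le hdx hdoi (by decide)
  exact absurd this (by decide)

lemma pv_len16 : PySem.Str.len "https://doi.org/" = 16 := by decide
lemma pv_len15 : PySem.Str.len "http://doi.org/" = 15 := by decide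
lemma pv_len19 : PySem.Str.len "https://dx.doi.org/" = 19 := by decide
lemma pv_len18 : PySem.Str.len "http://dx.doi.org/" = 18 := by decide

lemma pv_sl3 (xs : List Char) : PySem.List.slice xs (some 3) none = xs.drop 3 := by
  rw [PySem.List.slice_from xs (by norm_num)]; rfl
lemma pv_sl7 (xs : List Char) : PySem.List.slice xs (some 7) none = xs.drop 7 := by
  rw [PySem.List.slice_from xs (by norm_num)]; rfl
lemma pv_sl8 (xs : List Char) : PySem.List.slice xs (some 8) none = xs.drop 8 := by
  rw [PySem.List.slice_from xs (by norm_num)]; rfl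
lemma pv_sl15 (xs : List Char) : PySem.List.slice xs (some 15) none = xs.drop 15 := by
  rw [PySem.List.slice_from xs (by norm_num)]; rfl
lemma pv_sl16 (xs : List Char) : PySem.List.slice xs (some 16) none = xs.drop 16 := by
  rw [PySem.List.slice_from xs (by norm_num)]; rfl
lemma pv_sl18 (xs : List Char) : PySem.List.slice xs (some 18) none = xs.drop 18 := by
  rw [PySem.List.slice_from xs (by norm_num)]; rfl
lemma pv_sl19 (xs : List Char) : PySem.List.slice xs (some 19) none = xs.drop 19 := by
  rw [PySem.List.slice_from xs (by norm_num)]; rfl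

lemma pv_tl1 : "https://doi.org/".toList = ['h','t','t','p','s',':','/','/','d','o','i','.','o','r','g','/'] := by decide
lemma pv_tl2 : "http://doi.org/".toList = ['h','t','t','p',':','/','/','d','o','i','.','o','r','g','/'] := by decide
lemma pv_tl3 : "https://dx.doi.org/".toList = ['h','t','t','p','s',':','/','/','d','x','.','d','o','i','.','o','r','g','/'] := by decide
lemma pv_tl4 : "http://dx.doi.org/".toList = ['h','t','t','p',':','/','/','d','x','.','d','o','i','.','o','r','g','/'] := by decide
lemma pv_tl5 : "https://".toList = ['h','t','t','p','s',':','/','/'] := by decide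
lemma pv_tl6 : "http://".toList = ['h','t','t','p',':','/','/'] := by decide
lemma pv_tl7 : "dx.".toList = ['d','x','.'] := by decide
lemma pv_tl8 : "doi.org/".toList = ['d','o','i','.','o','r','g','/'] := by decide

set_option maxHeartbeats 1000000 in
lemma pv_main (s : String) :
    pvLoopA s pvPrefixes =
      (let rest? : Option String :=
        if PySem.Str.startswith s "https://" then some (PySem.Str.slice s (some 8) none)
        else if PySem.Str.startswith s "http://" then some (PySem.Str.slice s (some 7) none)
        else none
      match rest? with
      | none => s
      | some rest =>
        let rest2 := if PySem.Str.startswith rest "dx." then PySem.Str.slice rest (some 3) none else rest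
        if PySem.Str.startswith rest2 "doi.org/" then PySem.Str.slice rest2 (some 8) none else s) := by
  apply String.toList_inj.mp
  by_cases h8 : ['h','t','t','p','s',':','/','/'] <+: s.toList
  · have h7 := pv_not_both_schemes h8
    by_cases hdx : ['d','x','.'] <+: s.toList.drop 8
    · have hnd := pv_not_dx_and_doi hdx
      by_cases hdoi : ['d','o','i','.','o','r','g','/'] <+: s.toList.drop 11
      · simp [pvLoopA, pvPrefixes, pv_sw, pv_swc, pv_len16, pv_len15, pv_len19, pv_len18,
          pv_tl1, pv_tl2, pv_tl3, pv_tl4, pv_tl5, pv_tl6, pv_tl7, pv_tl8,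
          apply_ite String.toList, pv_sl3, pv_sl7, pv_sl8, pv_sl15, pv_sl16, pv_sl18, pv_sl19,
          pv_c1, pv_c2, pv_c3, pv_c4, List.drop_drop, h8, h7, hdx, hdoi, hnd]
      · simp [pvLoopA, pvPrefixes, pv_sw, pv_swc, pv_len16, pv_len15, pv_len19, pv_len18,
          pv_tl1, pv_tl2, pv_tl3, pv_tl4, pv_tl5, pv_tl6, pv_tl7, pv_tl8,
          apply_ite String.toList, pv_sl3, pv_sl7, pv_sl8, pv_sl15, pv_sl16, pv_sl18, pv_sl19,
          pv_c1, pv_c2, pv_c3, pv_c4, List.drop_drop, h8, h7, hdx, hdoi, hnd]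
    · by_cases hdoi : ['d','o','i','.','o','r','g','/'] <+: s.toList.drop 8
      · simp [pvLoopA, pvPrefixes, pv_sw, pv_swc, pv_len16, pv_len15, pv_len19, pv_len18,
          pv_tl1, pv_tl2, pv_tl3, pv_tl4, pv_tl5, pv_tl6, pv_tl7, pv_tl8,
          apply_ite String.toList, pv_sl3, pv_sl7, pv_sl8, pv_sl15, pv_sl16, pv_sl18, pv_sl19,
          pv_c1, pv_c2, pv_c3, pv_c4, List.drop_drop, h8, h7, hdx, hdoi]
      · simp [pvLoopA, pvPrefixes, pv_sw, pv_swc, pv_len16, pv_len15, pv_len19, pv_len18,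
          pv_tl1, pv_tl2, pv_tl3, pv_tl4, pv_tl5, pv_tl6, pv_tl7, pv_tl8,
          apply_ite String.toList, pv_sl3, pv_sl7, pv_sl8, pv_sl15, pv_sl16, pv_sl18, pv_sl19,
          pv_c1, pv_c2, pv_c3, pv_c4, List.drop_drop, h8, h7, hdx, hdoi]
  · by_cases h7 : ['h','t','t','p',':','/','/'] <+: s.toList
    · by_cases hdx : ['d','x','.'] <+: s.toList.drop 7
      · have hnd := pv_not_dx_and_doi hdx
        by_cases hdoi : ['d','o','i','.','o','r','g','/'] <+: s.toList.drop 10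
        · simp [pvLoopA, pvPrefixes, pv_sw, pv_swc, pv_len16, pv_len15, pv_len19, pv_len18,
          pv_tl1, pv_tl2, pv_tl3, pv_tl4, pv_tl5, pv_tl6, pv_tl7, pv_tl8,
          apply_ite String.toList, pv_sl3, pv_sl7, pv_sl8, pv_sl15, pv_sl16, pv_sl18, pv_sl19,
          pv_c1, pv_c2, pv_c3, pv_c4, List.drop_drop, h8, h7, hdx, hdoi, hnd]
        · simp [pvLoopA, pvPrefixes, pv_sw, pv_swc, pv_len16, pv_len15, pv_len19, pv_len18,
          pv_tl1, pv_tl2, pv_tl3, pv_tl4, pv_tl5, pv_tl6, pv_tl7, pv_tl8,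
          apply_ite String.toList, pv_sl3, pv_sl7, pv_sl8, pv_sl15, pv_sl16, pv_sl18, pv_sl19,
          pv_c1, pv_c2, pv_c3, pv_c4, List.drop_drop, h8, h7, hdx, hdoi, hnd]
      · by_cases hdoi : ['d','o','i','.','o','r','g','/'] <+: s.toList.drop 7
        · simp [pvLoopA, pvPrefixes, pv_sw, pv_swc, pv_len16, pv_len15, pv_len19, pv_len18,
          pv_tl1, pv_tl2, pv_tl3, pv_tl4, pv_tl5, pv_tl6, pv_tl7, pv_tl8,
          apply_ite String.toList, pv_sl3, pv_sl7, pv_sl8, pv_sl15, pv_sl16, pv_sl18, pv_sl19,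
          pv_c1, pv_c2, pv_c3, pv_c4, List.drop_drop, h8, h7, hdx, hdoi]
        · simp [pvLoopA, pvPrefixes, pv_sw, pv_swc, pv_len16, pv_len15, pv_len19, pv_len18,
          pv_tl1, pv_tl2, pv_tl3, pv_tl4, pv_tl5, pv_tl6, pv_tl7, pv_tl8,
          apply_ite String.toList, pv_sl3, pv_sl7, pv_sl8, pv_sl15, pv_sl16, pv_sl18, pv_sl19,
          pv_c1, pv_c2, pv_c3, pv_c4, List.drop_drop, h8, h7, hdx, hdoi]
    · simp [pvLoopA, pvPrefixes, pv_sw, pv_swc, pv_len16, pv_len15, pv_len19, pv_len18,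
          pv_tl1, pv_tl2, pv_tl3, pv_tl4, pv_tl5, pv_tl6, pv_tl7, pv_tl8,
          apply_ite String.toList, pv_sl3, pv_sl7, pv_sl8, pv_sl15, pv_sl16, pv_sl18, pv_sl19,
          pv_c1, pv_c2, pv_c3, pv_c4, List.drop_drop, h8, h7]

-- ===== VERDICT (by name: the statement is the Claim_ definition above) =====
theorem clean_doi_spec : Claim_equal_clean_doi := by
  intro doi _
  unfold Spec_clean_doi clean_doi clean_doi_alt
  exact pv_main (PySem.Str.strip doi)
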